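-- pv_equiv track=rewrite | github.com/mjdtdw/rubik | twisty.py | nextAlg
-- ===== SOURCE A (Python) =====
-- def nextNameLayer(predNameLayer, namesLayers):
--     isReturn = False
--     for nameLayer in namesLayers:
--         if isReturn:
--             return nameLayer
--         if nameLayer == predNameLayer:
--             isReturn = True
--     return namesLayers[0]
--
-- def nextAlg(predAlg, namesLayers): #TODO constraint 4 rotates
--     result = []
--     transfer = True
--     for i in range(len(predAlg)):
--         head = predAlg[i]
--         tail = predAlg[i+1:]
--         if transfer:
--             nextHead = nextNameLayer(head, namesLayers)
--             if nextHead != namesLayers[0]: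
--                 transfer = False
--             result += [nextHead]
--         else:
--             result += [head]
--     if transfer:
--         result += [0]
--     return result
-- ===== SOURCE B (Python) =====
-- def succLayer(h, namesLayers):
--     # cyclic successor of the first occurrence of h; unknown names map to namesLayers[0]
--     if h in namesLayers:
--         return namesLayers[(namesLayers.index(h) + 1) % len(namesLayers)]
--     return namesLayers[0]
--
-- def nextAlg(predAlg, namesLayers):
--     if not predAlg:
--         return [0]
--     L0 = namesLayers[0]
--     nxts = [succLayer(h, namesLayers) for h in predAlg]      # pass 1: all successors
--     wraps = [x == L0 for x in nxts]                          # pass 2: which positions carry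
--     k = wraps.index(False) if False in wraps else len(predAlg)  # pass 3: carry length
--     if k == len(predAlg):
--         return [L0] * k + [0]
--     return [L0] * k + [nxts[k]] + predAlg[k + 1:]
-- ===== Notes on version B (the rewrite author's own statement) =====
-- stated objective: alternative
-- what changed: A's single fused loop with a transfer flag and a flag-scan nextNameLayer helper is replaced by staged whole-list passes: map every element to its cyclic successor computed arithmetically as namesLayers[(index(h)+1) % len], mark which positions wrap, take the carry length as the first non-wrapping position, and assemble the result from slices ([L0]*k + [nxts[k]] + predAlg[k+1:]).
-- outside the precondition, e.g. on nextAlg([1], []): A raises IndexError, B raises IndexError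
import Mathlib
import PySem

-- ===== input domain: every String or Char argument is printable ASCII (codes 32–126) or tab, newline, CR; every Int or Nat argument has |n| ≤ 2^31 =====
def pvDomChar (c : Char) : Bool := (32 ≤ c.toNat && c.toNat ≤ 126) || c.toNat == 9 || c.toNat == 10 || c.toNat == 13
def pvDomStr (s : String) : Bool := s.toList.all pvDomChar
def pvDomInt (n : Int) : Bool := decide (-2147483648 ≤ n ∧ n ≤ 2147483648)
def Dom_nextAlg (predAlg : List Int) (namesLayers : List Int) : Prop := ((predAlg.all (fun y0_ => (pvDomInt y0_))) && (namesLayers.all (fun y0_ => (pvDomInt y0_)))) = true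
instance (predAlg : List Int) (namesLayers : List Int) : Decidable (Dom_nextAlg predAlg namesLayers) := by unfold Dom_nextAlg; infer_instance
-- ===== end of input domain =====

-- B replaces A's fused flag-driven loop by staged whole-list passes (map successors via index+mod arithmetic, locate the carry length, assemble from slices); an alternative decomposition, not claimed faster.

-- ===== PORT A =====
-- the 'for nameLayer in namesLayers' loop with the isReturn flag; 'some x' = the 'return nameLayer'
def nextNameLayerGo (pred : Int) : List Int → Bool → Option Int
  | [], _ => none
  | x :: xs, isReturn => if isReturn then some x else nextNameLayerGo pred xs (x == pred)

def nextNameLayer (pred : Int) (names : List Int) : Int :=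
  match nextNameLayerGo pred names false with
  | some x => x
  | none => names.headD 0  -- namesLayers[0]; Pre_ guarantees names ≠ [] whenever this line is reached

-- the 'for i in range(len(predAlg))' loop over (head, rest), carrying transfer; the trailing '+= [0]' lands in the base case
def nextAlgGo (names : List Int) : List Int → Bool → List Int
  | [], transfer => if transfer then [0] else []
  | h :: t, transfer =>
    if transfer then
      let nh := nextNameLayer h names
      nh :: nextAlgGo names t (nh == names.headD 0)   -- transfer stays iff nextHead == namesLayers[0]
    else
      h :: nextAlgGo names t false

def nextAlg (predAlg : List Int) (namesLayers : List Int) : List Int :=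
  nextAlgGo namesLayers predAlg true

-- ===== PORT B =====
-- succLayer: namesLayers[(namesLayers.index(h)+1) % len(namesLayers)] if h in namesLayers else namesLayers[0]
def succLayer (h : Int) (names : List Int) : Int :=
  match PySem.List.index? names h with
  | some i => (PySem.List.pyGet? names (PySem.Int.mod ((i : Int) + 1) (names.length : Int))).getD 0
      -- the (i+1) % len index is always in range, so pyGet? is always 'some'; .getD 0 is unreachable
  | none => names.headD 0  -- namesLayers[0]; Pre_ guarantees names ≠ [] when this is reached

def nextAlg_alt (predAlg : List Int) (namesLayers : List Int) : List Int :=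
  if predAlg = [] then [0]
  else
    let L0 := namesLayers.headD 0  -- namesLayers[0]; Pre_ guarantees namesLayers ≠ [] on this branch
    let nxts := predAlg.map (fun h => succLayer h namesLayers)   -- pass 1: all successors
    let wraps := nxts.map (fun x => x == L0)                     -- pass 2: which positions carry
    let k := if wraps.contains false then (PySem.List.index? wraps false).getD 0 else predAlg.length  -- pass 3
    if k = predAlg.length then List.replicate k L0 ++ [0]
    else List.replicate k L0 ++ [nxts.getD k 0] ++ PySem.List.slice predAlg (some ((k : Int) + 1)) none

-- ===== PRECONDITION & SPEC =====
-- Pre_ excludes exactly the inputs where A raises IndexError: namesLayers = [] with predAlg ≠ [] (namesLayers[0] is evaluated).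
def Pre_nextAlg (predAlg : List Int) (namesLayers : List Int) : Prop :=
  predAlg = [] ∨ namesLayers ≠ []
instance (predAlg : List Int) (namesLayers : List Int) : Decidable (Pre_nextAlg predAlg namesLayers) := by unfold Pre_nextAlg; infer_instance
def pvWitness_nextAlg : List Int × List Int := ([1, 2], [1, 2, 3])

def Spec_nextAlg (predAlg : List Int) (namesLayers : List Int) (out : List Int) : Prop := out = nextAlg_alt predAlg namesLayers
instance (predAlg : List Int) (namesLayers : List Int) (out : List Int) : Decidable (Spec_nextAlg predAlg namesLayers out) := by unfold Spec_nextAlg; infer_instance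

-- ===== CLAIM (what is proved, stated in full; the proofs are below) =====
def Claim_equal_nextAlg : Prop := ∀ (predAlg : List Int) (namesLayers : List Int), Dom_nextAlg predAlg namesLayers → Pre_nextAlg predAlg namesLayers → Spec_nextAlg predAlg namesLayers (nextAlg predAlg namesLayers)

-- ===== LEMMAS AND PROOFS =====

-- proof-only reference function: one carry step per element
def carry (names : List Int) : List Int → List Int
  | [] => [0]
  | h :: t =>
    let nh := nextNameLayer h names
    if nh = names.headD 0 then names.headD 0 :: carry names t else nh :: t

-- proof-only copy of nextAlg_alt's nonempty branch
def altCore (names : List Int) (l : List Int) : List Int :=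
  let L0 := names.headD 0
  let nxts := l.map (fun h => succLayer h names)
  let wraps := nxts.map (fun x => x == L0)
  let k := if wraps.contains false then (PySem.List.index? wraps false).getD 0 else l.length
  if k = l.length then List.replicate k L0 ++ [0]
  else List.replicate k L0 ++ [nxts.getD k 0] ++ PySem.List.slice l (some ((k : Int) + 1)) none

theorem nextAlg_alt_eq_altCore (l names : List Int) (hl : l ≠ []) :
    nextAlg_alt l names = altCore names l := by
  unfold nextAlg_alt altCore
  rw [if_neg hl]

-- A side: with transfer off the loop copies the rest
theorem nextAlgGo_false (names : List Int) (l : List Int) :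
    nextAlgGo names l false = l := by
  induction l with
  | nil => simp [nextAlgGo]
  | cons h t ih => simp [nextAlgGo, ih]

theorem nextAlgGo_eq_carry (names : List Int) (l : List Int) :
    nextAlgGo names l true = carry names l := by
  induction l with
  | nil => rfl
  | cons h t ih =>
    by_cases hs : nextNameLayer h names = names.head?.getD 0
    · simp [nextAlgGo, carry, hs, ih]
    · have hb : (nextNameLayer h names == names.head?.getD 0) = false := by
        simpa [beq_iff_eq] using hs
      simp [nextAlgGo, carry, hs, hb, nextAlgGo_false]

-- A's inner scan with a lit flag returns the next element
theorem go_true (h : Int) (l : List Int) : nextNameLayerGo h l true = l.head? := by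
  cases l <;> simp [nextNameLayerGo]

theorem go_false_of_not_mem (h : Int) (l : List Int) (hm : h ∉ l) :
    nextNameLayerGo h l false = none := by
  induction l with
  | nil => rfl
  | cons x xs ih =>
    rw [List.mem_cons, not_or] at hm
    have hx : (x == h) = false := beq_eq_false_iff_ne.mpr (Ne.symm hm.1)
    simp [nextNameLayerGo, hx, ih hm.2]

theorem go_split (h : Int) (pre suf : List Int) (hp : h ∉ pre) :
    nextNameLayerGo h (pre ++ h :: suf) false = suf.head? := by
  induction pre with
  | nil => simp [nextNameLayerGo, go_true]
  | cons x xs ih =>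
    rw [List.mem_cons, not_or] at hp
    have hx : (x == h) = false := beq_eq_false_iff_ne.mpr (Ne.symm hp.1)
    simp [nextNameLayerGo, hx, ih hp.2]

-- B's index+mod successor equals A's flag-scan successor
theorem succLayer_eq_nextNameLayer (h : Int) (names : List Int) :
    succLayer h names = nextNameLayer h names := by
  cases hidx : PySem.List.index? names h with
  | none =>
    have hm : h ∉ names := (PySem.List.index?_eq_none_iff names h).mp hidx
    simp only [succLayer, nextNameLayer, hidx, go_false_of_not_mem h names hm]
  | some i =>
    obtain ⟨pre, suf, rfl, rfl, hp⟩ := (PySem.List.index?_eq_some_iff _ h _).mp hidx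
    simp only [succLayer, nextNameLayer, hidx, go_split h pre suf hp]
    have hcast : ((pre.length : Int) + 1) = ((pre.length + 1 : Nat) : Int) := by push_cast; ring
    rw [hcast, PySem.Int.mod_natCast, PySem.List.pyGet?_natCast]
    cases suf with
    | nil =>
      have hlen : (pre ++ [h]).length = pre.length + 1 := by simp
      rw [hlen, Nat.mod_self]
      cases pre with
      | nil => rfl
      | cons x xs => simp [List.head?]
    | cons y ys =>
      have hmod : (pre.length + 1) % (pre ++ h :: y :: ys).length = pre.length + 1 := by
        have : (pre ++ h :: y :: ys).length = pre.length + (2 + ys.length) := by simp; omega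
        rw [this]; exact Nat.mod_eq_of_lt (by omega)
      rw [hmod]
      have hget : (pre ++ h :: y :: ys)[pre.length + 1]? = some y := by
        rw [List.getElem?_append_right (by omega)]
        simp
      rw [hget]
      rfl

-- altCore on the empty list
theorem altCore_nil (names : List Int) : altCore names [] = [0] := by
  simp [altCore]

-- altCore when the head does not wrap: carry length 0, tail untouched
theorem altCore_cons_nowrap (names : List Int) (h : Int) (t : List Int)
    (hw : succLayer h names ≠ names.headD 0) :
    altCore names (h :: t) = succLayer h names :: t := by
  have hb : (succLayer h names == names.headD 0) = false := beq_eq_false_iff_ne.mpr hw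
  simp only [altCore, List.map_cons, hb, List.length_cons]
  have hcW : (false :: (t.map (fun h => succLayer h names)).map
      (fun x => x == names.headD 0)).contains false = true := by
    rw [List.contains_cons]
    rfl
  have hiW : PySem.List.index? (false :: (t.map (fun h => succLayer h names)).map
      (fun x => x == names.headD 0)) false = some 0 :=
    PySem.List.index?_cons_self false _
  simp only [hcW, hiW, Option.getD_some, if_true]
  rw [if_neg (by omega)]
  rw [show ((0 : Nat) : Int) + 1 = (1 : Int) by norm_num, PySem.List.slice_from_one]
  simp

-- altCore when the head wraps: one more leading L0
theorem altCore_cons_wrap (names : List Int) (h : Int) (t : List Int)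
    (hw : succLayer h names = names.headD 0) :
    altCore names (h :: t) = names.headD 0 :: altCore names t := by
  have hb : (succLayer h names == names.headD 0) = true := by
    rw [beq_iff_eq]; exact hw
  simp only [altCore, List.map_cons, hb, List.length_cons]
  by_cases hc : ((t.map (fun h => succLayer h names)).map
      (fun x => x == names.headD 0)).contains false = true
  · -- some later position does not wrap
    obtain ⟨j, hj⟩ := Option.isSome_iff_exists.mp
      ((PySem.List.index?_isSome_iff _ false).mpr (List.mem_of_elem_eq_true hc))
    obtain ⟨hk, -, -⟩ := PySem.List.getElem_of_index?_eq_some hj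
    simp only [List.length_map] at hk
    have hcW : (true :: (t.map (fun h => succLayer h names)).map
        (fun x => x == names.headD 0)).contains false = true := by
      rw [List.contains_cons, hc]
      rfl
    have hiW : PySem.List.index? (true :: (t.map (fun h => succLayer h names)).map
        (fun x => x == names.headD 0)) false = some (j + 1) := by
      rw [PySem.List.index?_cons_of_ne _ (by simp), hj]
      rfl
    simp only [hcW, hiW, hc, hj, Option.getD_some, if_true]
    rw [if_neg (by omega), if_neg (by omega)]
    have hs1 : ((j : Int) + 1 + 1) = ((j + 2 : Nat) : Int) := by push_cast; ring
    have hs2 : ((j : Int) + 1) = ((j + 1 : Nat) : Int) := by push_cast; ring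
    rw [show (((j + 1 : Nat) : Int) + 1) = ((j + 2 : Nat) : Int) by push_cast; ring,
      hs2, PySem.List.slice_from_natCast, PySem.List.slice_from_natCast]
    simp [List.replicate_succ]
  · -- every position wraps: both sides are all-L0 plus the appended 0
    have hcF : ((t.map (fun h => succLayer h names)).map
        (fun x => x == names.headD 0)).contains false = false := by
      simpa using hc
    have hcW : (true :: (t.map (fun h => succLayer h names)).map
        (fun x => x == names.headD 0)).contains false = false := by
      rw [List.contains_cons, hcF]
      rfl
    simp only [hcW, hcF, Bool.false_eq_true, if_false]
    simp [List.replicate_succ]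

-- B's staged passes compute one carry step per element
theorem altCore_eq_carry (names : List Int) (l : List Int) :
    altCore names l = carry names l := by
  induction l with
  | nil => rw [altCore_nil]; rfl
  | cons h t ih =>
    by_cases hw : succLayer h names = names.headD 0
    · rw [altCore_cons_wrap names h t hw, ih, carry,
        if_pos (by rw [← succLayer_eq_nextNameLayer]; exact hw)]
    · rw [altCore_cons_nowrap names h t hw, carry,
        if_neg (by rw [← succLayer_eq_nextNameLayer]; exact hw),
        succLayer_eq_nextNameLayer]

-- ===== VERDICT (by name: the statement is the Claim_ definition above) =====
theorem nextAlg_spec : Claim_equal_nextAlg := by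
  intro predAlg namesLayers _ hpre
  unfold Spec_nextAlg
  by_cases hp : predAlg = []
  · subst hp; simp [nextAlg, nextAlgGo, nextAlg_alt]
  · rw [nextAlg, nextAlgGo_eq_carry, nextAlg_alt_eq_altCore predAlg namesLayers hp,
      altCore_eq_carry namesLayers predAlg]
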